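-- pv_equiv track=rewrite | github.com/cversek/MacEff | macf/src/macf/voice/correction.py | phonetic_key
-- ===== SOURCE A (Python) =====
-- def phonetic_key(word: str) -> str:
--     """Simple phonetic key — reduces word to consonant skeleton.
--
--     Not a full Soundex/Metaphone, but catches common speech-to-text
--     confusions like: JOTEWR→Jotur, MACF→MacF, demini→the mini.
--     """
--     word = word.upper()
--     # Remove vowels (except leading), collapse doubles
--     if not word:
--         return ""
--     result = [word[0]]
--     for c in word[1:]:
--         if c not in 'AEIOU' and c != result[-1]:
--             result.append(c)
--     return ''.join(result)
-- ===== SOURCE B (Python) =====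
-- def phonetic_key(word: str) -> str:
--     """Two-pass rewrite: vowel-filter pass, then a run-collapse pass that keeps
--     each character differing from its predecessor in the filtered sequence."""
--     word = word.upper()
--     if not word:
--         return ""
--     filtered = [word[0]] + [c for c in word[1:] if c not in 'AEIOU']
--     return filtered[0] + ''.join(y for x, y in zip(filtered, filtered[1:]) if x != y)
-- ===== Notes on version B (the rewrite author's own statement) =====
-- stated objective: alternative
-- what changed: A's single fused loop (append if non-vowel and different from last kept) is split into two independent passes: a vowel filter building the kept sequence, then a run collapse via zip-with-predecessor that compares each element to its neighbour in the filtered list instead of to the output's last element.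
import Mathlib
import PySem

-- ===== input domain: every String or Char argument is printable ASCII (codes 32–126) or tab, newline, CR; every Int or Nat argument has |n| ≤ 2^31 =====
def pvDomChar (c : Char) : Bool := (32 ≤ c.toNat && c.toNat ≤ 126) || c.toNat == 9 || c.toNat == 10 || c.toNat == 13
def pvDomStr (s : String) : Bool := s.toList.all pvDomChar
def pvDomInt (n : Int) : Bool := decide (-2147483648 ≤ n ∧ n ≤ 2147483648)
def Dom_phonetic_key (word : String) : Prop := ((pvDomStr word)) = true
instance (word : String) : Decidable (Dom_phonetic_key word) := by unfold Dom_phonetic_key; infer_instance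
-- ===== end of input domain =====

-- B replaces A's fused loop (filter + dedup-against-last-kept in one pass) by two
-- independent passes: a vowel filter, then a run collapse comparing each element
-- with its predecessor in the filtered list (objective: alternative decomposition).


-- ===== PORT A =====
-- `c in 'AEIOU'`
def pkVowel (c : Char) : Bool := ['A', 'E', 'I', 'O', 'U'].contains c

-- Python appends to `result`; the accumulator is kept reversed (head = result[-1])
-- and reversed once at the end.
def phonetic_key (word : String) : String :=
  match (PySem.Str.upper word).toList with
  | [] => ""
  | c :: rest =>
    let result := rest.foldl
      (fun res c => if pkVowel c = false && c != res.headD c then c :: res else res) [c]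
    String.ofList result.reverse

-- ===== PORT B =====
def phonetic_key_alt (word : String) : String :=
  match (PySem.Str.upper word).toList with
  | [] => ""
  | c :: rest =>
    let filtered := c :: rest.filter (fun x => pkVowel x = false)
    String.ofList (c :: (List.zip filtered filtered.tail).filterMap
      (fun p => if p.1 != p.2 then some p.2 else none))

-- ===== PRECONDITION & SPEC =====
def Spec_phonetic_key (word : String) (out : String) : Prop := out = phonetic_key_alt word
instance (word : String) (out : String) : Decidable (Spec_phonetic_key word out) := by unfold Spec_phonetic_key; infer_instance

-- ===== CLAIM (what is proved, stated in full; the proofs are below) =====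
def Claim_equal_phonetic_key : Prop := ∀ (word : String), Dom_phonetic_key word → Spec_phonetic_key word (phonetic_key word)

-- ===== LEMMAS AND PROOFS =====

-- collapse of consecutive duplicates of l, given that `a` precedes l
def pkDedupFrom (a : Char) : List Char → List Char
  | [] => []
  | y :: l => if y ≠ a then y :: pkDedupFrom y l else pkDedupFrom y l

-- A's loop computes (reversed) the run collapse of the vowel-filtered tail
theorem pk_foldA (l : List Char) : ∀ (a : Char) (t : List Char),
    List.foldl (fun res c => if pkVowel c = false && c != res.headD c then c :: res else res)
      (a :: t) l
      = (pkDedupFrom a (l.filter (fun x => pkVowel x = false))).reverse ++ a :: t := by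
  induction l with
  | nil => intro a t; simp [pkDedupFrom]
  | cons y l ih =>
    intro a t
    simp only [List.foldl_cons, List.headD_cons]
    by_cases hv : pkVowel y = false
    · by_cases hya : y = a
      · subst hya
        rw [if_neg (by simp), ih, List.filter_cons_of_pos (by simp [hv])]
        simp [pkDedupFrom]
      · rw [if_pos (by simp [hv, bne_iff_ne, hya]), ih,
          List.filter_cons_of_pos (by simp [hv])]
        simp [pkDedupFrom, hya]
    · rw [if_neg (by simp [hv]), ih, List.filter_cons_of_neg (by simp [hv])]

-- B's zip-with-predecessor pass is the same run collapse
theorem pk_zipB (l : List Char) : ∀ (a : Char),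
    (List.zip (a :: l) l).filterMap (fun p => if p.1 != p.2 then some p.2 else none)
      = pkDedupFrom a l := by
  induction l with
  | nil => intro a; simp [pkDedupFrom]
  | cons y l ih =>
    intro a
    rw [List.zip_cons_cons, List.filterMap_cons]
    by_cases hya : y = a
    · subst hya
      rw [if_neg (by simp), ih]
      simp [pkDedupFrom]
    · rw [if_pos (show (((a, y).1 != (a, y).2) = true) by
        simp only [bne_iff_ne, ne_eq]; exact fun h => hya h.symm), ih]
      simp [pkDedupFrom, hya]

-- ===== VERDICT (by name: the statement is the Claim_ definition above) =====
theorem phonetic_key_spec : Claim_equal_phonetic_key := by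
  intro word _
  unfold Spec_phonetic_key phonetic_key phonetic_key_alt
  cases h : (PySem.Str.upper word).toList with
  | nil => rfl
  | cons c rest =>
    simp only [pk_foldA rest c []]
    rw [List.tail_cons, pk_zipB]
    simp
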